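-- pv_equiv track=rewrite | github.com/IaTsai/MMIP-HW2 | medcodec/codec/volume_codec.py | _plan_gop_structure
-- ===== SOURCE A (Python) =====
-- from typing import List, Tuple, Optional, Dict
--
-- I_SLICE = 0  # Intra-coded (independent)
--
-- P_SLICE = 1  # Predictive (forward prediction from previous)
--
-- B_SLICE = 2  # Bidirectional (prediction from both previous and next)
--
-- def _plan_gop_structure(num_slices: int, gop_size: int) -> List[Tuple[int, int, List[int]]]:
--     """
--     Plan GOP structure with I, P, and B slices.
--
--     Returns list of (display_index, slice_type, reference_indices)
--     Ordered by encoding priority (references first, then B-slices)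
--     """
--     plan = []
--
--     # P-slice interval within GOP (place P-slices evenly)
--     p_interval = max(2, gop_size // 3)
--
--     for gop_start in range(0, num_slices, gop_size):
--         gop_end = min(gop_start + gop_size, num_slices)
--         gop_length = gop_end - gop_start
--
--         # Determine reference frame positions within this GOP
--         ref_positions = [0]  # I-slice at start
--         pos = p_interval
--         while pos < gop_length:
--             ref_positions.append(pos)
--             pos += p_interval
--
--         # Add I-slice
--         plan.append((gop_start, I_SLICE, []))
--
--         # Add P-slices
--         for i, rel_pos in enumerate(ref_positions[1:], 1):
--             abs_pos = gop_start + rel_pos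
--             if abs_pos < gop_end:
--                 prev_ref = gop_start + ref_positions[i - 1]
--                 plan.append((abs_pos, P_SLICE, [prev_ref]))
--
--         # Add B-slices (between references)
--         for i in range(len(ref_positions)):
--             start_ref = gop_start + ref_positions[i]
--             if i + 1 < len(ref_positions):
--                 end_ref = gop_start + ref_positions[i + 1]
--             else:
--                 end_ref = gop_end
--
--             # B-slices between start_ref and end_ref
--             for b_pos in range(start_ref + 1, min(end_ref, gop_end)):
--                 if b_pos not in [gop_start + rp for rp in ref_positions]:
--                     # Find nearest references
--                     prev_ref = start_ref
--                     next_ref = end_ref if end_ref < num_slices else start_ref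
--                     plan.append((b_pos, B_SLICE, [prev_ref, next_ref]))
--
--     return plan
-- ===== SOURCE B (Python) =====
-- from typing import List, Tuple
--
-- I_SLICE = 0
-- P_SLICE = 1
-- B_SLICE = 2
--
-- def _plan_gop_structure(num_slices: int, gop_size: int) -> List[Tuple[int, int, List[int]]]:
--     """One fused walk over the reference chain per GOP: each step between
--     consecutive references emits its P-slice and its B-slices into two buckets,
--     concatenated after the I-slice; no ref_positions list, no membership test."""
--     plan = []
--     p_interval = max(2, gop_size // 3)
--     for gop_start in range(0, num_slices, gop_size):
--         gop_end = min(gop_start + gop_size, num_slices)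
--         p_bucket = []
--         b_bucket = []
--         r = gop_start
--         while True:
--             nxt = r + p_interval
--             end_ref = nxt if nxt < gop_end else gop_end
--             next_ref = end_ref if end_ref < num_slices else r
--             if nxt < gop_end:
--                 p_bucket.append((nxt, P_SLICE, [r]))
--             b_bucket.extend((b, B_SLICE, [r, next_ref]) for b in range(r + 1, end_ref))
--             if nxt >= gop_end:
--                 break
--             r = nxt
--         plan.append((gop_start, I_SLICE, []))
--         plan += p_bucket + b_bucket
--     return plan
-- ===== Notes on version B (the rewrite author's own statement) =====
-- stated objective: alternative
-- what changed: B replaces A's three per-GOP loops over a precomputed ref_positions list (P-loop with index lookups, then a B-loop whose inner membership test rebuilds the reference list for every B-slice) by a single walk along the reference chain that emits each P-slice and its run of B-slices directly into two buckets, with no reference list and no membership test.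
import Mathlib
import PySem

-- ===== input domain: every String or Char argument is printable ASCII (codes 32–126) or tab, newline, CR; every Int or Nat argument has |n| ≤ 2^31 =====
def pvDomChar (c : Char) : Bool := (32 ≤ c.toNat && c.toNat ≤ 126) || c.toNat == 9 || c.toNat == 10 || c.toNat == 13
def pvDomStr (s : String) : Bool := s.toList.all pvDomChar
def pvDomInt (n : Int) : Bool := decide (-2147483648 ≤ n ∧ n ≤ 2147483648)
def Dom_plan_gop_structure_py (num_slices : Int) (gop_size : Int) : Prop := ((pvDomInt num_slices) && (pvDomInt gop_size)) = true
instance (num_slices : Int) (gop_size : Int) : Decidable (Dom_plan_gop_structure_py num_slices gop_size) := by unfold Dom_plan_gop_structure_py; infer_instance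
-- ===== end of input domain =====

-- B replaces A's three per-GOP loops over the ref_positions list (with a
-- membership test, rebuilding the reference list, for every B-slice) by one walk
-- along the reference chain that emits each P-slice and its B-slice run directly.

-- ===== PORT A =====
-- A's `while pos < gop_length: ref_positions.append(pos); pos += p_interval` loop.
-- (The `0 < p_interval` conjunct is a totality guard only: A always calls this with
-- p_interval = max(2, …) ≥ 2, where the guard is equivalent to Python's `pos < gop_length`.)
def pvBuildRefs (gop_length p_interval pos : Int) (acc : List Int) : List Int :=
  if _h : pos < gop_length ∧ 0 < p_interval then
    pvBuildRefs gop_length p_interval (pos + p_interval) (acc ++ [pos])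
  else acc
termination_by (gop_length - pos).toNat
decreasing_by omega

-- body of A's `for i, rel_pos in enumerate(ref_positions[1:], 1)` loop
def pvPBody (gop_start gop_end : Int) (ref_positions : List Int)
    (plan : List (Int × Int × List Int)) (ir : Int × Int) : List (Int × Int × List Int) :=
  let abs_pos := gop_start + ir.2
  if abs_pos < gop_end then
    let prev_ref := gop_start + PySem.List.pyGetD ref_positions (ir.1 - 1) 0
    plan ++ [(abs_pos, 1, [prev_ref])]
  else plan

-- body of A's `for i in range(len(ref_positions))` loop, with its inner
-- `for b_pos in range(start_ref + 1, min(end_ref, gop_end))` loop and membership test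
def pvBBody (num_slices gop_start gop_end : Int) (ref_positions : List Int)
    (plan : List (Int × Int × List Int)) (i : Int) : List (Int × Int × List Int) :=
  let start_ref := gop_start + PySem.List.pyGetD ref_positions i 0
  let end_ref := if i + 1 < PySem.List.len ref_positions then
      gop_start + PySem.List.pyGetD ref_positions (i + 1) 0
    else gop_end
  (PySem.List.pyRange (start_ref + 1) (min end_ref gop_end) 1).foldl (fun plan b_pos =>
    if b_pos ∉ ref_positions.map (fun rp => gop_start + rp) then
      let prev_ref := start_ref
      let next_ref := if end_ref < num_slices then end_ref else start_ref
      plan ++ [(b_pos, 2, [prev_ref, next_ref])]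
    else plan) plan

-- one iteration of A's `for gop_start in range(0, num_slices, gop_size)` loop
def pvGopStepA (num_slices gop_size p_interval : Int)
    (plan : List (Int × Int × List Int)) (gop_start : Int) : List (Int × Int × List Int) :=
  let gop_end := min (gop_start + gop_size) num_slices
  let gop_length := gop_end - gop_start
  let ref_positions := pvBuildRefs gop_length p_interval p_interval [0]
  let plan := plan ++ [(gop_start, 0, ([] : List Int))]
  let plan := (PySem.List.enumerate (ref_positions.drop 1) 1).foldl (pvPBody gop_start gop_end ref_positions) plan
  (PySem.List.pyRange 0 (PySem.List.len ref_positions) 1).foldl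
    (pvBBody num_slices gop_start gop_end ref_positions) plan

def plan_gop_structure_py (num_slices : Int) (gop_size : Int) : List (Int × Int × List Int) :=
  let p_interval := max 2 (PySem.Int.floordiv gop_size 3)
  (PySem.List.pyRange 0 num_slices gop_size).foldl (pvGopStepA num_slices gop_size p_interval) []

-- ===== PORT B =====
-- B's `while True:` walk along the reference chain of one GOP, returning
-- (p_bucket, b_bucket).  (`0 < p_interval` is a totality guard only, as above.)
def pvSegWalk (num_slices gop_end p_interval r : Int) :
    List (Int × Int × List Int) × List (Int × Int × List Int) :=
  let nxt := r + p_interval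
  let end_ref := if nxt < gop_end then nxt else gop_end
  let next_ref := if end_ref < num_slices then end_ref else r
  let bs := (PySem.List.pyRange (r + 1) end_ref 1).map (fun b => (b, (2 : Int), [r, next_ref]))
  if _h : nxt < gop_end ∧ 0 < p_interval then
    let rest := pvSegWalk num_slices gop_end p_interval nxt
    ((nxt, 1, [r]) :: rest.1, bs ++ rest.2)
  else ([], bs)
termination_by (gop_end - r).toNat
decreasing_by omega

def plan_gop_structure_py_alt (num_slices : Int) (gop_size : Int) : List (Int × Int × List Int) :=
  let p_interval := max 2 (PySem.Int.floordiv gop_size 3)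
  (PySem.List.pyRange 0 num_slices gop_size).foldl (fun plan gop_start =>
    let gop_end := min (gop_start + gop_size) num_slices
    let buckets := pvSegWalk num_slices gop_end p_interval gop_start
    plan ++ [(gop_start, 0, [])] ++ buckets.1 ++ buckets.2) []

-- ===== PRECONDITION & SPEC =====
-- Pre_ excludes only gop_size = 0, where Python's range(0, num_slices, 0)
-- raises ValueError (in A and in B alike).
def Pre_plan_gop_structure_py (num_slices : Int) (gop_size : Int) : Prop := gop_size ≠ 0
instance (num_slices : Int) (gop_size : Int) : Decidable (Pre_plan_gop_structure_py num_slices gop_size) := by unfold Pre_plan_gop_structure_py; infer_instance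
def pvWitness_plan_gop_structure_py : Int × Int := (10, 4)

def Spec_plan_gop_structure_py (num_slices : Int) (gop_size : Int) (out : List (Int × Int × List Int)) : Prop := out = plan_gop_structure_py_alt num_slices gop_size
instance (num_slices : Int) (gop_size : Int) (out : List (Int × Int × List Int)) : Decidable (Spec_plan_gop_structure_py num_slices gop_size out) := by unfold Spec_plan_gop_structure_py; infer_instance

-- ===== CLAIM (what is proved, stated in full; the proofs are below) =====
def Claim_equal_plan_gop_structure_py : Prop := ∀ (num_slices : Int) (gop_size : Int), Dom_plan_gop_structure_py num_slices gop_size → Pre_plan_gop_structure_py num_slices gop_size → Spec_plan_gop_structure_py num_slices gop_size (plan_gop_structure_py num_slices gop_size)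

-- ===== LEMMAS AND PROOFS =====

theorem pvBuildRefs_acc (L p : Int) :
    ∀ (pos : Int) (acc : List Int), pvBuildRefs L p pos acc = acc ++ pvBuildRefs L p pos [] := by
  intro pos
  induction hd : (L - pos).toNat using Nat.strong_induction_on generalizing pos with
  | _ d ih =>
    intro acc
    rw [pvBuildRefs]
    conv_rhs => rw [pvBuildRefs]
    split_ifs with h
    · rw [ih (L - (pos+p)).toNat (by omega) (pos+p) rfl (acc ++ [pos]),
        ih (L - (pos+p)).toNat (by omega) (pos+p) rfl ([] ++ [pos])]
      simp
    · simp

theorem pvBuildRefs_nil_eq (L p pos : Int) :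
    pvBuildRefs L p pos [] = if pos < L ∧ 0 < p then pos :: pvBuildRefs L p (pos + p) [] else [] := by
  rw [pvBuildRefs]
  split_ifs with h
  · rw [pvBuildRefs_acc]; simp
  · rfl

theorem pvBuildRefs_get (L p : Int) :
    ∀ (pos : Int) (j : Nat) (hj : j < (pvBuildRefs L p pos []).length),
      (pvBuildRefs L p pos [])[j] = pos + j * p := by
  intro pos
  induction hd : (L - pos).toNat using Nat.strong_induction_on generalizing pos with
  | _ d ih =>
    intro j hj
    rw [List.getElem_of_eq (pvBuildRefs_nil_eq L p pos) hj]
    split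
    next h =>
      cases j with
      | zero => simp
      | succ j =>
        simp only [List.getElem_cons_succ]
        have hj' : j < (pvBuildRefs L p (pos+p) []).length := by
          have := hj; rw [pvBuildRefs_nil_eq] at this; simp [h] at this; omega
        rw [ih (L - (pos+p)).toNat (by omega) (pos+p) rfl j hj']
        push_cast; ring
    next h =>
      exfalso; have := hj; rw [pvBuildRefs_nil_eq] at this; simp [h] at this

theorem pvBuildRefs_len_iff (L p : Int) (hp : 0 < p) :
    ∀ (pos : Int) (j : Nat), j < (pvBuildRefs L p pos []).length ↔ pos + j * p < L := by
  intro pos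
  induction hd : (L - pos).toNat using Nat.strong_induction_on generalizing pos with
  | _ d ih =>
    intro j
    rw [pvBuildRefs_nil_eq]
    split_ifs with h
    · cases j with
      | zero => simpa using h.1
      | succ j =>
        have := ih (L - (pos+p)).toNat (by omega) (pos + p) rfl j
        simp only [List.length_cons]
        constructor
        · intro hj; have := this.mp (by omega); push_cast; linarith
        · intro hj; have := this.mpr (by push_cast at hj ⊢; linarith); omega
    · constructor
      · simp
      · intro hj
        exfalso
        have hj0 : (0:Int) ≤ j * p := by positivity
        omega

theorem pv_refs_get (L p : Int) (hp : 0 < p) (j : Nat)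
    (hj : j < (0 :: pvBuildRefs L p p []).length) :
    (0 :: pvBuildRefs L p p [])[j] = j * p := by
  cases j with
  | zero => simp
  | succ j =>
    simp only [List.getElem_cons_succ]
    rw [pvBuildRefs_get L p p j (by simpa using hj)]
    push_cast; ring

theorem pv_refs_len_iff (L p : Int) (hp : 0 < p) (j : Nat) :
    j + 1 < (0 :: pvBuildRefs L p p []).length ↔ ((j : Int) + 1) * p < L := by
  have := pvBuildRefs_len_iff L p hp p j
  simp only [List.length_cons]
  constructor
  · intro h; have := this.mp (by omega); linarith
  · intro h; have := this.mpr (by linarith); omega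

theorem pv_refs_mem (L p : Int) (hp : 0 < p) (x : Int)
    (hx : x ∈ (0 :: pvBuildRefs L p p [])) :
    ∃ j : Nat, j < (0 :: pvBuildRefs L p p []).length ∧ x = j * p := by
  rw [List.mem_iff_getElem] at hx
  obtain ⟨j, hj, hxj⟩ := hx
  exact ⟨j, hj, by rw [← hxj, pv_refs_get L p hp j hj]⟩

theorem pv_pfold (n gop_end p gs : Int) (hp : 0 < p) :
    ∀ (d k : Nat) (plan : List (Int × Int × List Int)),
      (0 :: pvBuildRefs (gop_end - gs) p p []).length - (k + 1) = d →
      k + 1 ≤ (0 :: pvBuildRefs (gop_end - gs) p p []).length →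
      (PySem.List.enumerate ((0 :: pvBuildRefs (gop_end - gs) p p []).drop (k + 1)) ((k : Int) + 1)).foldl
          (pvPBody gs gop_end (0 :: pvBuildRefs (gop_end - gs) p p [])) plan
        = plan ++ (pvSegWalk n gop_end p (gs + k * p)).1 := by
  intro d
  induction d using Nat.strong_induction_on with
  | _ d ih =>
    intro k plan hd hk
    set L := gop_end - gs with hL
    set RL := 0 :: pvBuildRefs L p p [] with hRL
    rcases eq_or_lt_of_le hk with heq | hlt
    · have hnil : RL.drop (k+1) = [] := List.drop_of_length_le (by omega)
      rw [hnil]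
      simp only [PySem.List.enumerate_nil, List.foldl_nil]
      have hnotlt : ¬ ((k : Int) + 1) * p < L := by
        rw [← pv_refs_len_iff L p hp k, ← hRL]; omega
      rw [pvSegWalk]
      have hcond : ¬ (gs + k * p + p < gop_end ∧ 0 < p) := by
        rintro ⟨h1, -⟩; apply hnotlt; linarith
      simp [hcond]
    · have hget1 : RL[k+1]'hlt = ((k:Int)+1) * p := by
        have := pv_refs_get L p hp (k+1) hlt; push_cast at this ⊢; omega
      have hlt' : (((k:Int))+1) * p < L := (pv_refs_len_iff L p hp k).mp hlt
      have hkk : k < RL.length := by omega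
      have hget0 : RL[k]'hkk = (k:Int) * p := pv_refs_get L p hp k hkk
      rw [List.drop_eq_getElem_cons hlt, PySem.List.enumerate_cons, List.foldl_cons]
      have hbody : pvPBody gs gop_end RL plan ((k:Int)+1, RL[k+1]'hlt)
          = plan ++ [(gs + ((k:Int)+1)*p, 1, [gs + (k:Int)*p])] := by
        simp only [pvPBody, hget1]
        have habs : gs + ((k:Int)+1)*p < gop_end := by omega
        rw [if_pos habs]
        have hidx : ((k:Int) + 1 - 1) = ((k : Nat) : Int) := by ring
        rw [hidx, PySem.List.pyGetD_natCast, List.getD_eq_getElem _ _ hkk, hget0]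
      rw [hbody]
      have hd' : RL.length - (k + 1 + 1) = d - 1 := by omega
      have hcond : gs + k * p + p < gop_end ∧ 0 < p := ⟨by linarith, hp⟩
      conv_rhs => rw [pvSegWalk]
      rw [dif_pos hcond]
      have hstart : ((k:Int) + 1) + 1 = ((k+1 : Nat) : Int) + 1 := by push_cast; ring
      rw [hstart, ih (d-1) (by omega) (k+1) _ hd' (by omega)]
      have e2 : gs + (↑(k+1):Int) * p = gs + (k:Int) * p + p := by push_cast; ring
      have e1 : gs + ((k:Int)+1) * p = gs + (k:Int) * p + p := by ring
      simp [e1]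

theorem pv_bfold (n gop_end p gs : Int) (hp : 0 < p) :
    ∀ (d k : Nat) (plan : List (Int × Int × List Int)),
      (0 :: pvBuildRefs (gop_end - gs) p p []).length - (k + 1) = d →
      k < (0 :: pvBuildRefs (gop_end - gs) p p []).length →
      (PySem.List.pyRange (k : Int) (((0 :: pvBuildRefs (gop_end - gs) p p []).length : Nat) : Int) 1).foldl
          (pvBBody n gs gop_end (0 :: pvBuildRefs (gop_end - gs) p p [])) plan
        = plan ++ (pvSegWalk n gop_end p (gs + k * p)).2 := by
  intro d
  induction d using Nat.strong_induction_on with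
  | _ d ih =>
    intro k plan hd hk
    set L := gop_end - gs with hL
    set RL := 0 :: pvBuildRefs L p p [] with hRL
    have hget0 : RL[k]'hk = (k:Int) * p := pv_refs_get L p hp k hk
    have hmul : ((k:Int)+1) * p = (k:Int) * p + p := by ring
    rw [PySem.List.pyRange_one_cons (by exact_mod_cast hk), List.foldl_cons]
    have hnm : ∀ b : Int, gs + (k:Int) * p < b → b < gs + ((k:Int)+1) * p →
        b ∉ RL.map (fun rp => gs + rp) := by
      intro b hb1 hb2 hmem
      rw [List.mem_map] at hmem
      obtain ⟨x, hx, hbx⟩ := hmem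
      obtain ⟨j, hj, hxj⟩ := pv_refs_mem L p hp x (by rwa [hRL] at hx)
      subst hxj
      have h1 : (k:Int) * p < j * p := by omega
      have h2 : (j:Int) * p < ((k:Int)+1) * p := by omega
      have : (k:Int) < j := lt_of_mul_lt_mul_right h1 (le_of_lt hp)
      have : (j:Int) < (k:Int) + 1 := lt_of_mul_lt_mul_right h2 (le_of_lt hp)
      omega
    by_cases hc : k + 1 < RL.length
    · -- interior segment: the next reference exists
      have hget1 : RL[k+1]'hc = ((k:Int)+1) * p := by
        have := pv_refs_get L p hp (k+1) hc; push_cast at this ⊢; omega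
      have hE : ((k:Int)+1) * p < L := (pv_refs_len_iff L p hp k).mp hc
      have hE2 : gs + (k:Int) * p + p < gop_end := by
        have := hE; rw [hmul] at this; omega
      have hbody : pvBBody n gs gop_end RL plan (k:Int)
          = plan ++ ((PySem.List.pyRange (gs + (k:Int)*p + 1) (gs + ((k:Int)+1)*p) 1).map
              (fun b => (b, 2, [gs + (k:Int)*p,
                if gs + ((k:Int)+1)*p < n then gs + ((k:Int)+1)*p else gs + (k:Int)*p]))) := by
        have hcast : ((k:Int) + 1) = ((k+1 : Nat) : Int) := by push_cast; ring
        simp only [pvBBody, PySem.List.len_eq, hcast, PySem.List.pyGetD_natCast]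
        have g0 : RL.getD k 0 = (k:Int) * p := by rw [List.getD_eq_getElem _ _ hk, hget0]
        have g1 : RL.getD (k+1) 0 = ((k:Int)+1) * p := by rw [List.getD_eq_getElem _ _ hc, hget1]
        have hiflen : ((k+1 : Nat) : Int) < ((RL.length : Nat) : Int) := by exact_mod_cast hc
        simp only [g0, g1]
        rw [if_pos hiflen]
        rw [min_eq_left (by rw [hmul]; omega)]
        rw [PySem.List.foldl_append_ite
          (p := fun b_pos => b_pos ∉ RL.map (fun rp => gs + rp))
          (f := fun b_pos => (b_pos, 2, [gs + (k:Int)*p,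
            if gs + ((k:Int)+1)*p < n then gs + ((k:Int)+1)*p else gs + (k:Int)*p]))]
        congr 1
        congr 1
        apply List.filter_eq_self.mpr
        intro b hb
        rw [PySem.List.mem_pyRange_one] at hb
        simp only [decide_eq_true_eq]
        exact hnm b (by omega) (by omega)
      rw [hbody]
      have hcast : ((k:Int) + 1) = ((k+1 : Nat) : Int) := by push_cast; ring
      rw [hcast, ih (d-1) (by omega) (k+1) _ (by omega) (by omega)]
      conv_rhs => rw [pvSegWalk]
      rw [dif_pos ⟨hE2, hp⟩]
      have e1 : gs + (↑(k+1):Int) * p = gs + (k:Int) * p + p := by push_cast; ring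
      have e2 : gs + ((k:Int)+1) * p = gs + (k:Int) * p + p := by ring
      simp only [e1]
      rw [if_pos hE2]
      simp
    · -- last segment: runs to gop_end
      have hnE : ¬ ((k:Int)+1) * p < L := by rw [← pv_refs_len_iff L p hp k, ← hRL]; omega
      have hnE2 : ¬ gs + (k:Int) * p + p < gop_end := by
        rw [hmul] at hnE; omega
      have hbody : pvBBody n gs gop_end RL plan (k:Int)
          = plan ++ ((PySem.List.pyRange (gs + (k:Int)*p + 1) gop_end 1).map
              (fun b => (b, 2, [gs + (k:Int)*p,
                if gop_end < n then gop_end else gs + (k:Int)*p]))) := by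
        simp only [pvBBody, PySem.List.len_eq, PySem.List.pyGetD_natCast]
        have g0 : RL.getD k 0 = (k:Int) * p := by rw [List.getD_eq_getElem _ _ hk, hget0]
        simp only [g0]
        rw [if_neg (show ¬ ((k:Int) + 1 < ((RL.length : Nat) : Int)) by
          intro h; exact hc (by exact_mod_cast h))]
        rw [min_self]
        rw [PySem.List.foldl_append_ite
          (p := fun b_pos => b_pos ∉ RL.map (fun rp => gs + rp))
          (f := fun b_pos => (b_pos, 2, [gs + (k:Int)*p,
            if gop_end < n then gop_end else gs + (k:Int)*p]))]
        congr 1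
        congr 1
        apply List.filter_eq_self.mpr
        intro b hb
        rw [PySem.List.mem_pyRange_one] at hb
        simp only [decide_eq_true_eq]
        exact hnm b (by omega) (by rw [hmul]; omega)
      rw [hbody]
      have hnil : PySem.List.pyRange ((k:Int) + 1) ((RL.length : Nat) : Int) 1 = [] := by
        rw [PySem.List.pyRange_one]
        have : (((RL.length : Nat) : Int) - ((k:Int)+1)).toNat = 0 := by omega
        rw [this]; simp
      rw [hnil, List.foldl_nil]
      conv_rhs => rw [pvSegWalk]
      rw [dif_neg (by rintro ⟨h1, -⟩; exact hnE2 h1)]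
      rw [if_neg hnE2]

theorem pv_gop_step (n g p gs : Int) (hp : 0 < p) (plan : List (Int × Int × List Int)) :
    pvGopStepA n g p plan gs
      = plan ++ [(gs, 0, [])]
          ++ (pvSegWalk n (min (gs + g) n) p gs).1 ++ (pvSegWalk n (min (gs + g) n) p gs).2 := by
  unfold pvGopStepA
  have hacc : pvBuildRefs (min (gs + g) n - gs) p p [0]
      = 0 :: pvBuildRefs (min (gs + g) n - gs) p p [] := by
    rw [pvBuildRefs_acc]; rfl
  simp only [hacc]
  have hlen : 0 + 1 ≤ (0 :: pvBuildRefs (min (gs + g) n - gs) p p []).length := by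
    simp
  have hp1 := pv_pfold n (min (gs + g) n) p gs hp
    ((0 :: pvBuildRefs (min (gs + g) n - gs) p p []).length - (0 + 1)) 0
    (plan ++ [(gs, 0, [])]) rfl hlen
  have hb1 := pv_bfold n (min (gs + g) n) p gs hp
    ((0 :: pvBuildRefs (min (gs + g) n - gs) p p []).length - (0 + 1)) 0
    ((plan ++ [(gs, 0, [])]) ++ (pvSegWalk n (min (gs + g) n) p gs).1) rfl (by simp)
  norm_num at hp1 hb1
  rw [PySem.List.len_eq]
  simp only [List.drop_succ_cons, List.drop_zero, List.length_cons, Nat.cast_add, Nat.cast_one]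
  rw [hp1, hb1]
  simp

-- ===== VERDICT (by name: the statement is the Claim_ definition above) =====
theorem plan_gop_structure_py_spec : Claim_equal_plan_gop_structure_py := by
  intro n g _ _
  unfold Spec_plan_gop_structure_py plan_gop_structure_py plan_gop_structure_py_alt
  have hp : 0 < max 2 (PySem.Int.floordiv g 3) := lt_of_lt_of_le (by norm_num) (le_max_left _ _)
  apply PySem.List.foldl_congr_mem
  intro plan gs _
  simpa using pv_gop_step n g (max 2 (PySem.Int.floordiv g 3)) gs hp plan
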